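-- pv_equiv track=rewrite | github.com/SebinYu-hub/PS2 | solution/8.stack/13.py | solution
-- ===== SOURCE A (Python) =====
-- from collections import deque
--
-- def solution(board, moves):
--     # 예시 입력값: board = [[0,0,0,0,0],[0,0,1,0,3],[0,2,5,0,1],[4,2,4,4,2],[3,5,1,3,1]]
--     #            moves = [1,5,3,5,1,2,1,4]
--
--     n = len(board)
--     # 각 열의 인형을 스택으로 변환 (전처리)
--     # list comprehension과 deque를 활용하여 최적화
--     columns = [deque(board[i][j] for i in range(n-1, -1, -1) if board[i][j])
--               for j in range(n)]
--     result = 0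
--     basket = deque()  # 바구니 스택
--
--     # 크레인 이동 처리
--     for move in moves:
--         col = move - 1  # 0-based 인덱스로 변환
--
--         # 해당 열에 인형이 있는 경우
--         if columns[col]:
--             doll = columns[col].pop()  # 인형 뽑기
--
--             # 바구니가 비어있지 않고, 마지막 인형과 같은 경우
--             if basket and basket[-1] == doll:
--                 basket.pop()  # 인형 터트리기
--                 result += 2   # 터진 인형 개수 추가
--             else:
--                 basket.append(doll)  # 새 인형 추가
--
--     return result
-- ===== SOURCE B (Python) =====
-- def solution(board, moves):
--     # per-column read pointer instead of precomputed column stacks; no column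
--     # preprocessing pass and no mutation of board
--     n = len(board)
--     top = [0] * n
--     basket = []
--     result = 0
--     for move in moves:
--         col = move - 1
--         r = top[col]
--         doll = 0
--         while r < n:
--             v = board[r][col]
--             r += 1
--             if v:
--                 doll = v
--                 break
--         top[col] = r
--         if doll:
--             if basket and basket[-1] == doll:
--                 basket.pop()
--                 result += 2
--             else:
--                 basket.append(doll)
--     return result
-- ===== Notes on version B (the rewrite author's own statement) =====
-- stated objective: alternative
-- what changed: Replaces A's upfront per-column deque preprocessing (building n filtered stacks before any move) with a lazy per-column read pointer: each move scans its column downward from a saved pointer for the first nonzero cell, so no column stacks are ever built.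
-- outside the precondition, e.g. on solution([[1, 1, 5], [5, 0, 1]], [2, 0]): A returns 0, B returns 2
import Mathlib
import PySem

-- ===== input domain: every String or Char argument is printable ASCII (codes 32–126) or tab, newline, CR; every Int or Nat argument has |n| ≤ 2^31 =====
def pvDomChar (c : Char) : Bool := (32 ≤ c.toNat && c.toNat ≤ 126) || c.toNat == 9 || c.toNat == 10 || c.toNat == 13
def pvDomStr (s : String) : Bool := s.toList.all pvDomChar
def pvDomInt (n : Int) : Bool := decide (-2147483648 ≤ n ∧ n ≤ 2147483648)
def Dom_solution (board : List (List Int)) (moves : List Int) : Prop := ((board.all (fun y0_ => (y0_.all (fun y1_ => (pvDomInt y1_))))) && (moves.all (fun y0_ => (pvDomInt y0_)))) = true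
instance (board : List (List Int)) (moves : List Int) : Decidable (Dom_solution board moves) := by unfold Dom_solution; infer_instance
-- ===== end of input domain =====

-- B replaces A's column-stack preprocessing by a per-column read pointer advanced lazily
-- during the moves (objective: alternative decomposition; no preprocessing pass, board not copied).

-- ===== PORT A =====
-- Python's deque per column is built bottom-up and popped from the RIGHT; the list here is
-- the same stack written top-first (head = next pop), so the comprehension runs i = 0..n-1.
def aStep (st : List (List Int) × List Int × Int) (move : Int) : List (List Int) × List Int × Int :=
  let col := move - 1
  match PySem.List.pyGetD st.1 col [] with
  | [] => st
  | doll :: stk =>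
      let columns := PySem.List.pySetD st.1 col stk
      match st.2.1 with
      | [] => (columns, [doll], st.2.2)
      | b :: bs => if b = doll then (columns, bs, st.2.2 + 2) else (columns, doll :: b :: bs, st.2.2)

def solution (board : List (List Int)) (moves : List Int) : Int :=
  let n : Int := board.length
  let columns : List (List Int) :=
    (PySem.List.pyRange 0 n 1).map (fun j =>
      (PySem.List.pyRange 0 n 1).filterMap (fun i =>
        let v := PySem.List.pyGetD (PySem.List.pyGetD board i []) j 0
        if v ≠ 0 then some v else none))
  (moves.foldl aStep (columns, ([] : List Int), (0 : Int))).2.2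

-- ===== PORT B =====
-- the 'while r < n' scan of Source B, with fuel n (enough: r starts ≥ 0 under Pre_)
def bScan (board : List (List Int)) (col : Int) (r : Int) : Nat → Int × Int
  | 0 => (0, r)
  | fuel+1 =>
    if r < (board.length : Int) then
      let v := PySem.List.pyGetD (PySem.List.pyGetD board r []) col 0
      if v ≠ 0 then (v, r + 1) else bScan board col (r + 1) fuel
    else (0, r)

def bStep (board : List (List Int)) (st : List Int × List Int × Int) (move : Int) : List Int × List Int × Int :=
  let col := move - 1
  let dr := bScan board col (PySem.List.pyGetD st.1 col 0) board.length
  let top := PySem.List.pySetD st.1 col dr.2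
  if dr.1 ≠ 0 then
    match st.2.1 with
    | [] => (top, [dr.1], st.2.2)
    | b :: bs => if b = dr.1 then (top, bs, st.2.2 + 2) else (top, dr.1 :: b :: bs, st.2.2)
  else (top, st.2.1, st.2.2)

def solution_alt (board : List (List Int)) (moves : List Int) : Int :=
  (moves.foldl (bStep board) (List.replicate board.length 0, ([] : List Int), (0 : Int))).2.2

-- ===== PRECONDITION & SPEC =====
-- Pre_ keeps the puzzle's natural domain: rows at least n = len(board) long (A reads board[i][j]
-- for all i,j < n, so shorter rows raise IndexError) and moves whose column index m-1 is a valid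
-- Python index of the n columns (out-of-range moves raise IndexError in both ports' Pythons);
-- boards with rows LONGER than n are excluded only when some move is ≤ 0: there A's negative
-- index wraps among the first n columns while B's wraps in the full row — outside the N×N domain.
def Pre_solution (board : List (List Int)) (moves : List Int) : Prop :=
  (∀ row ∈ board, board.length ≤ row.length) ∧
  (∀ m ∈ moves, 1 - (board.length : Int) ≤ m ∧ m ≤ (board.length : Int)) ∧
  ((∃ m ∈ moves, m ≤ 0) → ∀ row ∈ board, row.length = board.length)
instance (board : List (List Int)) (moves : List Int) : Decidable (Pre_solution board moves) := by
  unfold Pre_solution; infer_instance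

def pvWitness_solution : List (List Int) × List Int :=
  ([[0, 1], [2, 2]], [1, 2, 2])

def Spec_solution (board : List (List Int)) (moves : List Int) (out : Int) : Prop := out = solution_alt board moves
instance (board : List (List Int)) (moves : List Int) (out : Int) : Decidable (Spec_solution board moves out) := by unfold Spec_solution; infer_instance

-- ===== CLAIM (what is proved, stated in full; the proofs are below) =====
def Claim_equal_solution : Prop := ∀ (board : List (List Int)) (moves : List Int), Dom_solution board moves → Pre_solution board moves → Spec_solution board moves (solution board moves)

-- ===== LEMMAS AND PROOFS =====

-- column k of the board, read top-down
def colC (board : List (List Int)) (k : Nat) : List Int := board.map (fun row => row.getD k 0)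

-- normalized (Python) index
def normIdx (n : Nat) (i : Int) : Nat := (if i < 0 then i + n else i).toNat

lemma pyGetD_norm {α : Type} (xs : List α) (i : Int) (d : α)
    (h1 : -(xs.length : Int) ≤ i) (h2 : i < xs.length) :
    PySem.List.pyGetD xs i d = xs.getD (normIdx xs.length i) d := by
  unfold PySem.List.pyGetD PySem.List.pyGet? PySem.List.pyIdx? normIdx
  by_cases h : 0 ≤ i
  · rw [if_pos h, if_pos h2, if_neg (by omega)]
    rw [List.getD_eq_getElem?_getD]
    rfl
  · rw [if_neg h, if_pos h1, if_pos (by omega)]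
    rw [List.getD_eq_getElem?_getD]
    have : (i + ↑xs.length).toNat = xs.length - (-i).toNat := by omega
    rw [this]
    rfl

lemma pySetD_norm {α : Type} (xs : List α) (i : Int) (v : α)
    (h1 : -(xs.length : Int) ≤ i) (h2 : i < xs.length) :
    PySem.List.pySetD xs i v = xs.set (normIdx xs.length i) v := by
  unfold PySem.List.pySetD PySem.List.pySet? PySem.List.pyIdx? normIdx
  by_cases h : 0 ≤ i
  · rw [if_pos h, if_pos h2, if_neg (by omega)]
    rfl
  · rw [if_neg h, if_pos h1, if_pos (by omega)]
    have : (i + ↑xs.length).toNat = xs.length - (-i).toNat := by omega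
    rw [this]
    rfl

lemma filterMap_if_eq_filter {α : Type} (l : List α) (h : α → Int) :
    l.filterMap (fun i => if h i ≠ 0 then some (h i) else none)
      = (l.map h).filter (fun v => v ≠ 0) := by
  induction l with
  | nil => rfl
  | cons x xs ih =>
      rw [List.filterMap_cons, List.map_cons, List.filter_cons]
      by_cases hx : h x = 0
      · simp only [hx]; simpa using ih
      · simp only [hx, ne_eq, not_false_eq_true, decide_true, if_true]
        rw [ih]

lemma map_getD_range {α : Type} (l : List α) (d : α) :
    (List.range l.length).map (fun i => l.getD i d) = l := by
  apply List.ext_getElem (by simp)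
  intro i h1 h2
  simp only [List.getElem_map, List.getElem_range]
  rw [List.getD_eq_getElem]

-- A's initial columns, simplified
lemma cols_init (board : List (List Int)) :
    ((PySem.List.pyRange 0 (board.length : Int) 1).map (fun j =>
      (PySem.List.pyRange 0 (board.length : Int) 1).filterMap (fun i =>
        let v := PySem.List.pyGetD (PySem.List.pyGetD board i []) j 0
        if v ≠ 0 then some v else none)))
    = (List.range board.length).map (fun k => (colC board k).filter (fun v => v ≠ 0)) := by
  rw [PySem.List.pyRange_one]
  simp only [Int.sub_zero, Int.toNat_natCast, List.map_map]
  apply List.map_congr_left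
  intro k hk
  simp only [Function.comp_apply]
  rw [List.filterMap_map]
  have hcol : colC board k = (List.range board.length).map (fun i => (board.getD i []).getD k 0) := by
    unfold colC
    conv_lhs => rw [← map_getD_range board []]
    rw [List.map_map]
    rfl
  rw [hcol, ← filterMap_if_eq_filter]
  apply List.filterMap_congr
  intro i hi
  simp only [Function.comp, zero_add, PySem.List.pyGetD_natCast]

-- loop invariant relating A's remaining column stacks to B's read pointers
def StInv (board : List (List Int)) (cols : List (List Int)) (top : List Int) : Prop :=
  cols.length = board.length ∧ top.length = board.length ∧
  ∀ k, k < board.length → ∃ t : Nat, t ≤ board.length ∧ top.getD k 0 = (t : Int) ∧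
    cols.getD k [] = ((colC board k).drop t).filter (fun v => v ≠ 0)

lemma Inv_init (board : List (List Int)) :
    StInv board ((List.range board.length).map (fun k => (colC board k).filter (fun v => v ≠ 0)))
      (List.replicate board.length 0) := by
  refine ⟨by simp, by simp, ?_⟩
  intro k hk
  refine ⟨0, by omega, by simp, ?_⟩
  rw [List.getD_eq_getElem _ _ (by simpa using hk)]
  simp

lemma scan_spec (board : List (List Int)) (col : Int) (k : Nat)
    (hcol : ∀ row ∈ board, -(row.length : Int) ≤ col ∧ col < (row.length : Int) ∧
      normIdx row.length col = k) :
    ∀ fuel t, t ≤ board.length → board.length - t ≤ fuel →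
      (((colC board k).drop t).filter (fun v => v ≠ 0) = [] →
        bScan board col (t : Int) fuel = (0, (board.length : Int))) ∧
      (∀ v rest, ((colC board k).drop t).filter (fun v => v ≠ 0) = v :: rest →
        ∃ t', t ≤ t' ∧ t' < board.length ∧ bScan board col (t : Int) fuel = (v, ((t' + 1 : Nat) : Int)) ∧
          ((colC board k).drop (t' + 1)).filter (fun v => v ≠ 0) = rest) := by
  intro fuel
  induction fuel with
  | zero =>
      intro t ht hf
      have hte : t = board.length := by omega
      have hdl : (colC board k).drop t = [] := by
        apply List.drop_eq_nil_of_le; simp [colC]; omega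
      constructor
      · intro _; rw [hte]; rfl
      · intro v rest hvr; rw [hdl] at hvr; simp at hvr
  | succ fuel ih =>
      intro t ht hf
      by_cases hlt : t < board.length
      · -- read the cell board[t][col] = (colC board k)[t]
        have hclen : (colC board k).length = board.length := by simp [colC]
        have htc : t < (colC board k).length := by omega
        have hb1 : PySem.List.pyGetD board ((t : Nat) : Int) [] = board[t] := by
          rw [PySem.List.pyGetD_natCast, List.getD_eq_getElem _ _ hlt]
        obtain ⟨hr1, hr2, hr3⟩ := hcol (board[t]'hlt) (List.getElem_mem hlt)
        have hb2 : PySem.List.pyGetD (board[t]'hlt) col 0 = (colC board k)[t]'htc := by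
          rw [pyGetD_norm _ _ _ hr1 hr2, hr3]
          simp only [colC, List.getElem_map]
        have hdrop : (colC board k).drop t = ((colC board k)[t]'htc) :: (colC board k).drop (t+1) :=
          List.drop_eq_getElem_cons htc
        have hscan : bScan board col ((t : Nat) : Int) (fuel + 1)
            = if ((colC board k)[t]'htc) ≠ 0 then (((colC board k)[t]'htc), ((t : Nat) : Int) + 1)
              else bScan board col (((t : Nat) : Int) + 1) fuel := by
          conv_lhs => rw [bScan]
          rw [if_pos (show ((t : Nat) : Int) < (board.length : Int) by exact_mod_cast hlt)]
          simp only [hb1, hb2]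
        by_cases hv : ((colC board k)[t]'htc) = 0
        · -- empty cell: both sides skip row t
          have hfe : ((colC board k).drop t).filter (fun v => v ≠ 0)
              = ((colC board k).drop (t+1)).filter (fun v => v ≠ 0) := by
            rw [hdrop, List.filter_cons, hv]; simp
          have hcast : ((t : Nat) : Int) + 1 = (((t + 1 : Nat)) : Int) := by push_cast; ring
          have hih := ih (t + 1) (by omega) (by omega)
          constructor
          · intro hnil
            rw [hscan, if_neg (by simpa using hv), hcast]
            exact hih.1 (by rw [← hfe]; exact hnil)
          · intro v rest hvr
            obtain ⟨t', h1', h2', h3', h4'⟩ := hih.2 v rest (by rw [← hfe]; exact hvr)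
            exact ⟨t', by omega, h2', by rw [hscan, if_neg (by simpa using hv), hcast]; exact h3', h4'⟩
        · -- doll found at row t
          have hfe : ((colC board k).drop t).filter (fun v => v ≠ 0)
              = ((colC board k)[t]'htc) :: ((colC board k).drop (t+1)).filter (fun v => v ≠ 0) := by
            rw [hdrop, List.filter_cons]; simp [hv]
          constructor
          · intro hnil; rw [hfe] at hnil; simp at hnil
          · intro v rest hvr
            rw [hfe] at hvr
            obtain ⟨hv1, hv2⟩ := List.cons.injEq .. ▸ hvr
            refine ⟨t, le_refl t, hlt, ?_, hv2.symm ▸ rfl⟩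
            rw [hscan, if_pos (by simpa using hv), ← hv1]
            congr 1
      · have hte : t = board.length := by omega
        have hdl : (colC board k).drop t = [] := by
          apply List.drop_eq_nil_of_le; simp [colC]; omega
        constructor
        · intro _
          rw [hte]
          unfold bScan
          rw [if_neg (by omega)]
        · intro v rest hvr; rw [hdl] at hvr; simp at hvr

lemma step_rel (board : List (List Int)) (m : Int)
    (hwide : ∀ row ∈ board, board.length ≤ row.length)
    (hmsq : m ≤ 0 → ∀ row ∈ board, row.length = board.length)
    (hm : 1 - (board.length : Int) ≤ m ∧ m ≤ (board.length : Int))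
    (cols : List (List Int)) (top : List Int) (basket : List Int) (res : Int)
    (hInv : StInv board cols top) :
    StInv board (aStep (cols, basket, res) m).1 (bStep board (top, basket, res) m).1 ∧
    (aStep (cols, basket, res) m).2 = (bStep board (top, basket, res) m).2 := by
  obtain ⟨hcl, htl, hks⟩ := hInv
  have hb1 : -(board.length : Int) ≤ m - 1 := by omega
  have hb2 : m - 1 < (board.length : Int) := by omega
  set k := normIdx board.length (m - 1) with hkdef
  have hklt : k < board.length := by
    rw [hkdef]; unfold normIdx; split_ifs with h <;> omega
  obtain ⟨t, htle, htop, hcols⟩ := hks k hklt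
  have hcol : ∀ row ∈ board, -(row.length : Int) ≤ m - 1 ∧ m - 1 < (row.length : Int) ∧
      normIdx row.length (m - 1) = k := by
    intro row hr
    by_cases hmp : 0 < m
    · have hlen := hwide row hr
      refine ⟨by omega, by omega, ?_⟩
      rw [hkdef]; unfold normIdx
      rw [if_neg (show ¬(m - 1 < 0) by omega), if_neg (show ¬(m - 1 < 0) by omega)]
    · have hsq := hmsq (by omega) row hr
      rw [hsq]; exact ⟨hb1, hb2, hkdef.symm⟩
  have hAget : PySem.List.pyGetD cols (m - 1) [] = cols.getD k [] := by
    rw [pyGetD_norm cols (m - 1) [] (by rw [hcl]; exact hb1) (by rw [hcl]; exact hb2), hcl, ← hkdef]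
  have hBt : PySem.List.pyGetD top (m - 1) 0 = ((t : Nat) : Int) := by
    rw [pyGetD_norm top (m - 1) 0 (by rw [htl]; exact hb1) (by rw [htl]; exact hb2), htl, ← hkdef,
      htop]
  have hscan := scan_spec board (m - 1) k hcol board.length t htle (by omega)
  cases hfil : ((colC board k).drop t).filter (fun v => v ≠ 0) with
  | nil =>
      have hAcols : cols.getD k [] = [] := hcols.trans hfil
      have hs := hscan.1 hfil
      have hsetB : PySem.List.pySetD top (m - 1) ((board.length : Nat) : Int)
          = top.set k ((board.length : Nat) : Int) := by
        rw [pySetD_norm top (m - 1) _ (by rw [htl]; exact hb1) (by rw [htl]; exact hb2), htl,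
          ← hkdef]
      have hA : aStep (cols, basket, res) m = (cols, basket, res) := by
        unfold aStep; dsimp only; rw [hAget, hAcols]
      have hB : bStep board (top, basket, res) m
          = (top.set k ((board.length : Nat) : Int), basket, res) := by
        unfold bStep; dsimp only; rw [hBt, hs]; dsimp only
        rw [if_neg (by simp), hsetB]
      rw [hA, hB]
      refine ⟨⟨hcl, by simp [htl], ?_⟩, rfl⟩
      intro k' hk'
      by_cases hkk : k' = k
      · subst hkk
        refine ⟨board.length, le_refl _, ?_, ?_⟩
        · rw [List.getD_eq_getElem _ _ (by simp [htl]; omega), List.getElem_set_self]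
        · rw [hcols.trans hfil, List.drop_eq_nil_of_le (by simp [colC])]
          simp
      · obtain ⟨t2, h2a, h2b, h2c⟩ := hks k' hk'
        refine ⟨t2, h2a, ?_, h2c⟩
        rw [List.getD_eq_getElem _ _ (by simp [htl]; omega),
          List.getElem_set_ne (by omega), ← List.getD_eq_getElem _ 0 (by omega), h2b]
  | cons v rest =>
      obtain ⟨t', ht'1, ht'2, hs, hrest⟩ := hscan.2 v rest hfil
      have hvne : v ≠ 0 := by
        have hvmem : v ∈ ((colC board k).drop t).filter (fun v => v ≠ 0) := by
          rw [hfil]; exact List.mem_cons_self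
        simpa using List.of_mem_filter hvmem
      have hAcols : cols.getD k [] = v :: rest := hcols.trans hfil
      have hsetA : PySem.List.pySetD cols (m - 1) rest = cols.set k rest := by
        rw [pySetD_norm cols (m - 1) _ (by rw [hcl]; exact hb1) (by rw [hcl]; exact hb2), hcl,
          ← hkdef]
      have hsetB : PySem.List.pySetD top (m - 1) (((t' + 1 : Nat)) : Int)
          = top.set k (((t' + 1 : Nat)) : Int) := by
        rw [pySetD_norm top (m - 1) _ (by rw [htl]; exact hb1) (by rw [htl]; exact hb2), htl,
          ← hkdef]
      have hInv' : StInv board (cols.set k rest) (top.set k (((t' + 1 : Nat)) : Int)) := by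
        refine ⟨by simp [hcl], by simp [htl], ?_⟩
        intro k' hk'
        by_cases hkk : k' = k
        · subst hkk
          refine ⟨t' + 1, by omega, ?_, ?_⟩
          · rw [List.getD_eq_getElem _ _ (by simp [htl]; omega), List.getElem_set_self]
          · rw [List.getD_eq_getElem _ _ (by simp [hcl]; omega), List.getElem_set_self, hrest]
        · obtain ⟨t2, h2a, h2b, h2c⟩ := hks k' hk'
          refine ⟨t2, h2a, ?_, ?_⟩
          · rw [List.getD_eq_getElem _ _ (by simp [htl]; omega),
              List.getElem_set_ne (by omega), ← List.getD_eq_getElem _ 0 (by omega), h2b]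
          · rw [List.getD_eq_getElem _ _ (by simp [hcl]; omega),
              List.getElem_set_ne (by omega), ← List.getD_eq_getElem _ [] (by omega), h2c]
      cases basket with
      | nil =>
          have hA : aStep (cols, [], res) m = (cols.set k rest, [v], res) := by
            unfold aStep; dsimp only; rw [hAget, hAcols]; dsimp only; rw [hsetA]
          have hB : bStep board (top, [], res) m
              = (top.set k (((t' + 1 : Nat)) : Int), [v], res) := by
            unfold bStep; dsimp only; rw [hBt, hs]; dsimp only
            rw [if_pos (by simpa using hvne), hsetB]
          rw [hA, hB]; exact ⟨hInv', rfl⟩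
      | cons b bs =>
          by_cases hb : b = v
          · have hA : aStep (cols, b :: bs, res) m = (cols.set k rest, bs, res + 2) := by
              unfold aStep; dsimp only; rw [hAget, hAcols]; dsimp only
              rw [if_pos hb, hsetA]
            have hB : bStep board (top, b :: bs, res) m
                = (top.set k (((t' + 1 : Nat)) : Int), bs, res + 2) := by
              unfold bStep; dsimp only; rw [hBt, hs]; dsimp only
              rw [if_pos (by simpa using hvne), if_pos hb, hsetB]
            rw [hA, hB]; exact ⟨hInv', rfl⟩
          · have hA : aStep (cols, b :: bs, res) m
                = (cols.set k rest, v :: b :: bs, res) := by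
              unfold aStep; dsimp only; rw [hAget, hAcols]; dsimp only
              rw [if_neg hb, hsetA]
            have hB : bStep board (top, b :: bs, res) m
                = (top.set k (((t' + 1 : Nat)) : Int), v :: b :: bs, res) := by
              unfold bStep; dsimp only; rw [hBt, hs]; dsimp only
              rw [if_pos (by simpa using hvne), if_neg hb, hsetB]
            rw [hA, hB]; exact ⟨hInv', rfl⟩

lemma fold_rel (board : List (List Int)) (moves : List Int)
    (hwide : ∀ row ∈ board, board.length ≤ row.length)
    (hmsq : ∀ m ∈ moves, m ≤ 0 → ∀ row ∈ board, row.length = board.length)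
    (hmv : ∀ m ∈ moves, 1 - (board.length : Int) ≤ m ∧ m ≤ (board.length : Int)) :
    ∀ cols top basket res, StInv board cols top →
      (moves.foldl aStep (cols, basket, res)).2 = (moves.foldl (bStep board) (top, basket, res)).2 := by
  induction moves with
  | nil => intro cols top basket res _; rfl
  | cons m rest ih =>
      intro cols top basket res hInv
      have hstep := step_rel board m hwide (hmsq m (by simp)) (hmv m (by simp))
        cols top basket res hInv
      have hrest : ∀ m' ∈ rest, 1 - (board.length : Int) ≤ m' ∧ m' ≤ (board.length : Int) :=
        fun m' h => hmv m' (by simp [h])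
      have hrsq : ∀ m' ∈ rest, m' ≤ 0 → ∀ row ∈ board, row.length = board.length :=
        fun m' h => hmsq m' (by simp [h])
      simp only [List.foldl_cons]
      rw [show aStep (cols, basket, res) m
          = ((aStep (cols, basket, res) m).1, (bStep board (top, basket, res) m).2) from by
        rw [← hstep.2]]
      exact ih hrsq hrest _ _ _ _ hstep.1

-- ===== VERDICT (by name: the statement is the Claim_ definition above) =====
theorem solution_spec : Claim_equal_solution := by
  intro board moves _ hpre
  unfold Spec_solution solution solution_alt
  dsimp only
  rw [cols_init board]
  obtain ⟨hw, hmv, hsq0⟩ := hpre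
  have := fold_rel board moves hw (fun m hm hm0 => hsq0 ⟨m, hm, hm0⟩) hmv
    ((List.range board.length).map (fun k => (colC board k).filter (fun v => v ≠ 0)))
    (List.replicate board.length 0) [] 0 (Inv_init board)
  exact congrArg Prod.snd this
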